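-- pv_equiv track=rewrite | github.com/cathayrisk/Anya | pages/1_Document_Comparison.py | highlight_diffs_in_text
-- ===== SOURCE A (Python) =====
-- def highlight_diffs_in_text(text, diff_lines, color="#fff2ac"):
--     lines = [line for line in text.splitlines() if line.strip()]
--     highlighted = []
--     for idx, line in enumerate(lines, 1):
--         if idx in diff_lines:
--             highlighted.append(f"<span style='background-color:{color}'>{line}</span>")
--         else:
--             highlighted.append(line)
--     return "<br>".join(highlighted)
-- ===== SOURCE B (Python) =====
-- def highlight_diffs_in_text(text, diff_lines, color="#fff2ac"):
--     lines = [line for line in text.splitlines() if line.strip()]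
--     out = list(lines)
--     for idx in diff_lines:
--         if 1 <= idx <= len(lines):
--             out[idx - 1] = f"<span style='background-color:{color}'>{lines[idx - 1]}</span>"
--     return "<br>".join(out)
-- ===== Notes on version B (the rewrite author's own statement) =====
-- stated objective: alternative
-- what changed: Instead of scanning every line and testing membership in diff_lines, B copies the kept lines and scatters highlight markup directly onto the in-range positions listed in diff_lines.
import Mathlib
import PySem

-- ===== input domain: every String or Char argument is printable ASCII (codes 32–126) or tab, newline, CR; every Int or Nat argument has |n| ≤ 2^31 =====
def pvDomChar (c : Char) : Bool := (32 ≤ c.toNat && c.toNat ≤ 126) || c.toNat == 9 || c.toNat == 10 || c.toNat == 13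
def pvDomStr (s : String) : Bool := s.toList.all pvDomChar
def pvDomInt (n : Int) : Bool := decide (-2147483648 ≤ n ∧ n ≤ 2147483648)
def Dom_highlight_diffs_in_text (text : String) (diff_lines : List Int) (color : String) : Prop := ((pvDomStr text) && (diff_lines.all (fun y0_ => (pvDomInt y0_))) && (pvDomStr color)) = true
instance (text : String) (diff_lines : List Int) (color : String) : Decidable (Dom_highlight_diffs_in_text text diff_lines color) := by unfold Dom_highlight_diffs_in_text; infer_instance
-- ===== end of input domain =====

-- B replaces A's per-line membership scan with a copy of the kept lines plus a scatter
-- of the highlight markup onto the in-range indices of diff_lines (objective: alternative).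

-- ===== PORT A =====
def highlight_diffs_in_text (text : String) (diff_lines : List Int) (color : String) : String :=
  let lines := (PySem.Str.splitlines text).filter (fun line => decide (PySem.Str.strip line ≠ ""))
  let highlighted := (PySem.List.enumerate lines 1).foldl
    (fun acc p =>
      if diff_lines.contains p.1 then
        acc ++ ["<span style='background-color:" ++ color ++ "'>" ++ p.2 ++ "</span>"]
      else acc ++ [p.2]) []
  PySem.Str.join "<br>" highlighted

-- ===== PORT B =====
def highlight_diffs_in_text_alt (text : String) (diff_lines : List Int) (color : String) : String :=
  let lines := (PySem.Str.splitlines text).filter (fun line => decide (PySem.Str.strip line ≠ ""))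
  let out := diff_lines.foldl
    (fun out idx =>
      if 1 ≤ idx ∧ idx ≤ (lines.length : Int) then
        out.set (idx - 1).toNat
          ("<span style='background-color:" ++ color ++ "'>" ++ lines.getD (idx - 1).toNat "" ++ "</span>")
      else out) lines
  PySem.Str.join "<br>" out

-- ===== PRECONDITION & SPEC =====
def Spec_highlight_diffs_in_text (text : String) (diff_lines : List Int) (color : String) (out : String) : Prop := out = highlight_diffs_in_text_alt text diff_lines color
instance (text : String) (diff_lines : List Int) (color : String) (out : String) : Decidable (Spec_highlight_diffs_in_text text diff_lines color out) := by unfold Spec_highlight_diffs_in_text; infer_instance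

-- ===== CLAIM (what is proved, stated in full; the proofs are below) =====
def Claim_equal_highlight_diffs_in_text : Prop := ∀ (text : String) (diff_lines : List Int) (color : String), Dom_highlight_diffs_in_text text diff_lines color → Spec_highlight_diffs_in_text text diff_lines color (highlight_diffs_in_text text diff_lines color)

-- ===== LEMMAS AND PROOFS =====

-- B's scatter loop, characterised elementwise: position i ends up highlighted iff i+1 occurs in ds.
lemma pv_scatter_getElem? (lines : List String) (f : String → String) (ds : List Int)
    (out : List String) (hlen : out.length = lines.length) (i : Nat) :
    (ds.foldl (fun out idx =>
        if 1 ≤ idx ∧ idx ≤ (lines.length : Int) then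
          out.set (idx - 1).toNat (f (lines.getD (idx - 1).toNat ""))
        else out) out)[i]? =
      if ds.contains ((i : Int) + 1) ∧ i < lines.length then some (f (lines.getD i ""))
      else out[i]? := by
  induction ds generalizing out with
  | nil => simp
  | cons idx ds ih =>
    simp only [List.foldl_cons, List.contains_cons]
    by_cases hr : 1 ≤ idx ∧ idx ≤ (lines.length : Int)
    · rw [if_pos hr, ih _ (by simpa using hlen)]
      have hj : (idx - 1).toNat < lines.length := by omega
      rw [List.getElem?_set]
      by_cases hi : i < lines.length
      · by_cases hds : ds.contains ((i : Int) + 1) = true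
        · rw [if_pos ⟨hds, hi⟩, if_pos ⟨by simp only [Bool.or_eq_true]; exact Or.inr hds, hi⟩]
        · by_cases hij : (idx - 1).toNat = i
          · rw [if_neg (by tauto), if_pos hij, if_pos (by omega),
              if_pos ⟨by simp only [Bool.or_eq_true, beq_iff_eq]; exact Or.inl (by omega), hi⟩, hij]
          · rw [if_neg (by tauto), if_neg hij, if_neg ?_]
            rintro ⟨h', -⟩
            simp only [Bool.or_eq_true] at h'
            rcases h' with h' | h'
            · rw [beq_iff_eq] at h'; omega
            · exact hds h'
      · rw [if_neg (by tauto), if_neg (by omega), if_neg (by tauto)]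
    · rw [if_neg hr, ih _ hlen]
      by_cases hi : i < lines.length
      · have hidx : (((i : Int) + 1) == idx) = false := by
          simp only [beq_eq_false_iff_ne]; omega
        rw [hidx]; simp
      · simp [hi]

-- A's append loop is a map over the enumeration.
lemma pv_map_loop (lines : List String) (dl : List Int) (g : String → String) :
    ((PySem.List.enumerate lines 1).foldl
      (fun acc p => if dl.contains p.1 then acc ++ [g p.2] else acc ++ [p.2]) ([] : List String)) =
    (PySem.List.enumerate lines 1).map (fun p => if dl.contains p.1 then g p.2 else p.2) := by
  have h : (fun (acc : List String) (p : Int × String) =>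
      if dl.contains p.1 then acc ++ [g p.2] else acc ++ [p.2]) =
      fun acc p => acc ++ [if dl.contains p.1 then g p.2 else p.2] := by
    funext acc p; by_cases hc : p.1 ∈ dl <;> simp [hc]
  rw [h, PySem.List.foldl_append_singleton_eq_map]; simp

lemma pv_lists_eq (lines : List String) (dl : List Int) (g : String → String) :
    (PySem.List.enumerate lines 1).map (fun p => if dl.contains p.1 then g p.2 else p.2) =
    dl.foldl (fun out idx =>
        if 1 ≤ idx ∧ idx ≤ (lines.length : Int) then
          out.set (idx - 1).toNat (g (lines.getD (idx - 1).toNat ""))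
        else out) lines := by
  apply List.ext_getElem?
  intro i
  rw [pv_scatter_getElem? lines g dl lines rfl i, List.getElem?_map,
    PySem.List.getElem?_enumerate]
  by_cases hi : i < lines.length
  · have h1 : (1 : Int) + (i : Int) = (i : Int) + 1 := by ring
    have hg : lines[i]? = some lines[i] := List.getElem?_eq_getElem hi
    by_cases hc : ((i : Int) + 1) ∈ dl
    · simp [h1, hc, hi]
    · simp [h1, hc, hi]
  · have hg : lines[i]? = none := List.getElem?_eq_none (by omega)
    simp [hi]

-- ===== VERDICT (by name: the statement is the Claim_ definition above) =====
theorem highlight_diffs_in_text_spec : Claim_equal_highlight_diffs_in_text := by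
  intro text diff_lines color _
  unfold Spec_highlight_diffs_in_text highlight_diffs_in_text highlight_diffs_in_text_alt
  exact congrArg (PySem.Str.join "<br>")
    ((pv_map_loop ((PySem.Str.splitlines text).filter (fun line => decide (PySem.Str.strip line ≠ "")))
        diff_lines
        (fun s => "<span style='background-color:" ++ color ++ "'>" ++ s ++ "</span>")).trans
      (pv_lists_eq ((PySem.Str.splitlines text).filter (fun line => decide (PySem.Str.strip line ≠ "")))
        diff_lines
        (fun s => "<span style='background-color:" ++ color ++ "'>" ++ s ++ "</span>")))
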